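-- pv_equiv track=rewrite | github.com/powermano/pycharmtest | niukewang/tiaoshiban.py | solution
-- ===== SOURCE A (Python) =====
-- def solution(a, b):
--     divs = [[] for _ in range(b + 1)]
--     for i in range(2, b + 1):
--         for j in range(i + i, b + 1, i):
--             divs[j].append(i)
--     # using BFS
--     seen = set([a])
--     par, child = [a], []
--     depth = 0
--     while par:
--         depth += 1
--         for p in par:
--             for f in divs[p]:
--                 temp = f + p
--                 if temp not in seen:
--                     seen.add(temp)
--                     if temp == b:
--                         return depth
--                     elif temp < b:
--                         child.append(f + p)
--         par, child = child, []
--     return -1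
-- ===== SOURCE B (Python) =====
-- def solution(a, b):
--     # forward DP in increasing value order (edges only increase the value),
--     # instead of A's breadth-first search
--     divs = [[] for _ in range(b + 1)]
--     for i in range(2, b + 1):
--         for j in range(i + i, b + 1, i):
--             divs[j].append(i)
--     dist = {a: 0}
--     for v in range(a, b + 1):
--         d = dist.get(v)
--         if d is None:
--             continue
--         for f in divs[v]:
--             w = v + f
--             if w <= b and (w not in dist or dist[w] > d + 1):
--                 dist[w] = d + 1
--     d = dist.get(b)
--     return d if d else -1
-- ===== Notes on version B (the rewrite author's own statement) =====
-- stated objective: alternative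
-- what changed: Replaces A's breadth-first search over frontier lists (seen-set, par/child queues, early return on reaching b) by a forward dynamic-programming sweep over values a..b with a distance dictionary, relaxing each divisor edge once in increasing value order (edges only increase the value, so the sweep order is topological).
import Mathlib
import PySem

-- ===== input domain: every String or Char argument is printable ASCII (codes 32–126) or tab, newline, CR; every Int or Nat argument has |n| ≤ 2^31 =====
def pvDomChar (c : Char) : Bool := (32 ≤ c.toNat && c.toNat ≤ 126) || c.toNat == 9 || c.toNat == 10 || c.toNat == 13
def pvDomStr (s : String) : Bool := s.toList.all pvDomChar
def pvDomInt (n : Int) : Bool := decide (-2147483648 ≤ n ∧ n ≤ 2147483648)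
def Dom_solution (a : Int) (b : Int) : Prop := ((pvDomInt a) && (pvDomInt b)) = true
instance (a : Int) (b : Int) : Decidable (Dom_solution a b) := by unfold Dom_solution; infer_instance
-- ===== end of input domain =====

-- B replaces A's breadth-first search by a forward DP sweep in increasing value
-- order (same divisor sieve; edges only increase the value, so the sweep order is
-- topological); same return value on all of Pre_ — where A raises, B is free.

-- ===== PORT A =====
-- shared helper: the divisor sieve, identical lines in both Pythons
-- divs = [[] for _ in range(b+1)]; for i in 2..b: for j in 2i,3i,..≤b: divs[j].append(i)
def pvSieve (b : Int) : Array (List Int) :=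
  (PySem.List.pyRange 2 (b + 1) 1).foldl (fun d i =>
      (PySem.List.pyRange (i + i) (b + 1) i).foldl
        (fun d j => d.modify j.toNat (fun l => l ++ [i])) d)
    (Array.replicate (b + 1).toNat [])

-- Python list indexing xs[i] (a negative index counts from the end; none =
-- IndexError) — exact; an Array instead of a List only for O(1) access
def pvArrGet? {α : Type} (xs : Array α) (i : Int) : Option α :=
  if 0 ≤ i then xs[i.toNat]?
  else if 0 ≤ i + (xs.size : Int) then xs[(i + (xs.size : Int)).toNat]?
  else none

-- divs[p] (in-range on every access made under Pre_)
def pvNbrs (divs : Array (List Int)) (p : Int) : List Int :=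
  (pvArrGet? divs p).getD []

-- one pass of A's `while par:` body: `for p in par: for f in divs[p]: …`,
-- `.error d` models the early `return depth`
-- body of the inner `for f in divs[p]:` loop (`.error` = the early return already taken)
def pvStep (b depth p : Int) (acc : Except Int (Std.HashSet Int × List Int)) (f : Int) :
    Except Int (Std.HashSet Int × List Int) :=
  match acc with
  | .error d => .error d
  | .ok (seen, child) =>
    let temp := f + p
    if seen.contains temp then .ok (seen, child)
    else if temp = b then .error depth
    else if temp < b then .ok (seen.insert temp, child ++ [temp])
    else .ok (seen.insert temp, child)

def pvRound (b depth : Int) (divs : Array (List Int)) (par : List Int)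
    (seen : Std.HashSet Int) : Except Int (Std.HashSet Int × List Int) :=
  par.foldl (fun acc p => (pvNbrs divs p).foldl (pvStep b depth p) acc) (.ok (seen, []))

-- A's while-loop; `fuel` only makes the recursion structural (never exhausted under Pre_)
def pvLoop (b : Int) (divs : Array (List Int)) : Nat → Int → List Int → Std.HashSet Int → Int
  | 0, _, _, _ => -1
  | fuel + 1, depth, par, seen =>
    if par = [] then -1
    else
      match pvRound b (depth + 1) divs par seen with
      | .error d => d
      | .ok (seen', child) => pvLoop b divs fuel (depth + 1) child seen'

def solution (a : Int) (b : Int) : Int :=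
  pvLoop b (pvSieve b) ((b - a).toNat + 2) 0 [a] ((∅ : Std.HashSet Int).insert a)

-- ===== PORT B =====
-- `if w <= b and (w not in dist or dist[w] > d + 1): dist[w] = d + 1`
def pvRelax (b v d : Int) (dist : Std.HashMap Int Int) (f : Int) : Std.HashMap Int Int :=
  let w := v + f
  if w ≤ b then
    match dist[w]? with
    | none => dist.insert w (d + 1)
    | some dw => if d + 1 < dw then dist.insert w (d + 1) else dist
  else dist

def solution_alt (a : Int) (b : Int) : Int :=
  let divs := pvSieve b
  let dist := (PySem.List.pyRange a (b + 1) 1).foldl (fun dist v =>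
      match dist[v]? with
      | none => dist
      | some d => (pvNbrs divs v).foldl (pvRelax b v d) dist)
    ((∅ : Std.HashMap Int Int).insert a 0)
  match dist[b]? with
  | none => -1
  | some d => if d = 0 then -1 else d

-- ===== PRECONDITION & SPEC =====
-- Pre_ is exactly where the Python A returns: outside it (b < 0, or a outside
-- [-(b+1), b]) A raises IndexError on divs[a] / divs[p].
def Pre_solution (a : Int) (b : Int) : Prop := 0 ≤ b ∧ -(b + 1) ≤ a ∧ a ≤ b
instance (a : Int) (b : Int) : Decidable (Pre_solution a b) := by
  unfold Pre_solution; infer_instance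

def pvWitness_solution : Int × Int := (3, 10)

def Spec_solution (a : Int) (b : Int) (out : Int) : Prop := out = solution_alt a b
instance (a : Int) (b : Int) (out : Int) : Decidable (Spec_solution a b out) := by
  unfold Spec_solution; infer_instance

-- ===== CLAIM (what is proved, stated in full; the proofs are below) =====
def Claim_equal_solution : Prop :=
  ∀ (a : Int) (b : Int), Dom_solution a b → Pre_solution a b → Spec_solution a b (solution a b)

-- ===== LEMMAS AND PROOFS =====

/- Generic helpers -/

theorem pv_mem_modify {α : Type} (P : α → Prop) (d : Array α) (n : Nat) (g : α → α)
    (hd : ∀ x ∈ d, P x) (hg : ∀ x ∈ d, P (g x)) : ∀ x ∈ d.modify n g, P x := by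
  intro x hx
  rw [Array.mem_iff_getElem] at hx
  obtain ⟨i, hi, hxe⟩ := hx
  rw [Array.getElem_modify] at hxe
  have hi' : i < d.size := by simpa [Array.size_modify] using hi
  by_cases hin : n = i
  · simp only [hin] at hxe
    exact hxe ▸ hg _ (Array.getElem_mem hi')
  · simp only [if_neg hin] at hxe
    exact hxe ▸ hd _ (Array.getElem_mem hi')

theorem pv_least (P : Nat → Prop) (n : Nat) (hn : P n) :
    ∃ j, j ≤ n ∧ P j ∧ ∀ m < j, ¬ P m := by
  induction n using Nat.strong_induction_on with
  | _ n ih =>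
    by_cases h : ∃ m < n, P m
    · obtain ⟨m, hm, hPm⟩ := h
      obtain ⟨j, hj, hPj, hmin⟩ := ih m hm hPm
      exact ⟨j, le_trans hj (le_of_lt hm), hPj, hmin⟩
    · exact ⟨n, le_refl n, hn, fun m hm hPm => h ⟨m, hm, hPm⟩⟩

/- The sieve only ever appends numbers i with 2 ≤ i -/

theorem pvSieve_pos (b : Int) : ∀ l ∈ pvSieve b, ∀ f ∈ l, 2 ≤ f := by
  unfold pvSieve
  apply List.foldlRecOn (motive := fun d => ∀ l ∈ d, ∀ f ∈ l, 2 ≤ f)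
  · intro l hl f hf
    rw [(Array.mem_replicate.1 hl).2] at hf
    simp at hf
  · intro d hd i hi
    have hi2 : 2 ≤ i := ((PySem.List.mem_pyRange_one).1 hi).1
    apply List.foldlRecOn (motive := fun d => ∀ l ∈ d, ∀ f ∈ l, 2 ≤ f)
    · exact hd
    · intro d' hd' j _
      exact pv_mem_modify _ d' j.toNat _ hd'
        (fun l hl f hf => by
          rcases List.mem_append.1 hf with h | h
          · exact hd' l hl f h
          · simpa using (List.mem_singleton.1 h) ▸ hi2)

theorem pvArrGet?_mem {α : Type} (xs : Array α) (i : Int) (x : α)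
    (h : pvArrGet? xs i = some x) : x ∈ xs := by
  unfold pvArrGet? at h
  split at h
  · obtain ⟨hlt, rfl⟩ := Array.getElem?_eq_some_iff.1 h
    exact Array.getElem_mem hlt
  · split at h
    · obtain ⟨hlt, rfl⟩ := Array.getElem?_eq_some_iff.1 h
      exact Array.getElem_mem hlt
    · cases h

theorem pvNbrs_pos (b u f : Int) (h : f ∈ pvNbrs (pvSieve b) u) : 2 ≤ f := by
  unfold pvNbrs at h
  cases hg : pvArrGet? (pvSieve b) u with
  | none => rw [hg] at h; simp at h
  | some l =>
    rw [hg] at h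
    exact pvSieve_pos b l (pvArrGet?_mem _ _ _ hg) f h

/- Reachability from `a` by steps u → u+f, f ∈ divs[u], landing ≤ b, all
   non-final nodes < v (the DP sweep bound; v = b+1 is the full relation). -/

inductive pvRch (b : Int) (divs : Array (List Int)) (a : Int) : Int → Nat → Int → Prop where
  | zero (v : Int) : pvRch b divs a v 0 a
  | succ {v : Int} {n : Nat} {u f : Int} (h : pvRch b divs a v n u) (hu : u < v)
      (hf : f ∈ pvNbrs divs u) (hle : u + f ≤ b) : pvRch b divs a v (n + 1) (u + f)

def pvHD (divs : Array (List Int)) : Prop := ∀ u f : Int, f ∈ pvNbrs divs u → 2 ≤ f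

theorem pvRch_ge {b : Int} {divs : Array (List Int)} {a v : Int} {n : Nat} {w : Int}
    (HD : pvHD divs) (h : pvRch b divs a v n w) : a + 2 * (n : Int) ≤ w := by
  induction h with
  | zero => simp
  | succ h hu hf hle ih =>
    have := HD _ _ hf
    push_cast
    push_cast at ih
    omega

theorem pvRch_mono {b : Int} {divs : Array (List Int)} {a v v' : Int} {n : Nat} {w : Int}
    (hvv : v ≤ v') (h : pvRch b divs a v n w) : pvRch b divs a v' n w := by
  induction h with
  | zero => exact .zero v'
  | succ h hu hf hle ih => exact .succ ih (lt_of_lt_of_le hu hvv) hf hle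

theorem pvRch_le_b {b : Int} {divs : Array (List Int)} {a v : Int} {n : Nat} {w : Int}
    (h : pvRch b divs a v n w) (hn : n ≠ 0) : w ≤ b := by
  cases h with
  | zero => exact absurd rfl hn
  | succ h hu hf hle => exact hle

theorem pvRch_split {b : Int} {divs : Array (List Int)} {a v : Int} {n : Nat} {w : Int}
    (HD : pvHD divs) :
    pvRch b divs a (v + 1) n w ↔
      pvRch b divs a v n w ∨
        ∃ m f, n = m + 1 ∧ pvRch b divs a v m v ∧ f ∈ pvNbrs divs v ∧ w = v + f ∧ w ≤ b := by
  constructor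
  · intro h
    have key : ∀ (v' : Int) (n : Nat) (w : Int), pvRch b divs a v' n w → v' = v + 1 →
        pvRch b divs a v n w ∨
          ∃ m f, n = m + 1 ∧ pvRch b divs a v m v ∧ f ∈ pvNbrs divs v ∧ w = v + f ∧ w ≤ b := by
      intro v' n w h
      induction h with
      | zero => intro _; exact Or.inl (.zero v)
      | succ hsub hu hf hle ih =>
        intro hv'
        subst hv'
        rcases ih rfl with hpre | ⟨m, f', hm, hrv, hf', hw, _⟩
        · rename_i u f
          rcases lt_or_eq_of_le (by omega : u ≤ v) with hlt | heq
          · exact Or.inl (.succ hpre hlt hf hle)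
          · subst heq
            exact Or.inr ⟨_, f, rfl, hpre, hf, rfl, hle⟩
        · have h2 := HD _ _ hf'
          omega
    exact key _ _ _ h rfl
  · rintro (h | ⟨m, f, rfl, hrv, hf, rfl, hle⟩)
    · exact pvRch_mono (by omega) h
    · exact .succ (pvRch_mono (by omega) hrv) (by omega) hf hle

-- non-final nodes of a reach path are ≤ b - 2 (< b) because the following step lands ≤ b
theorem pvRch_succ_inv {b : Int} {divs : Array (List Int)} {a v : Int} {n : Nat} {w : Int}
    (HD : pvHD divs) (h : pvRch b divs a v (n + 1) w) :
    ∃ u f, pvRch b divs a v n u ∧ u < v ∧ f ∈ pvNbrs divs u ∧ w = u + f ∧ w ≤ b ∧ u < b := by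
  cases h with
  | succ hsub hu hf hle =>
    have := HD _ _ hf
    exact ⟨_, _, hsub, hu, hf, rfl, hle, by omega⟩

/- ===== B side: the DP sweep ===== -/

def pvSweepTo (a b v : Int) : Std.HashMap Int Int :=
  (PySem.List.pyRange a v 1).foldl (fun dist v =>
      match dist[v]? with
      | none => dist
      | some d => (pvNbrs (pvSieve b) v).foldl (pvRelax b v d) dist)
    ((∅ : Std.HashMap Int Int).insert a 0)

theorem pv_alt_eq (a b : Int) :
    solution_alt a b =
      match (pvSweepTo a b (b + 1))[b]? with
      | none => -1
      | some d => if d = 0 then -1 else d := rfl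

def pvMinD (old : Option Int) (x : Int) : Int :=
  match old with | none => x | some y => min y x

theorem pvMinD_idem (o : Option Int) (x : Int) : pvMinD (some (pvMinD o x)) x = pvMinD o x := by
  cases o with
  | none => simp [pvMinD]
  | some y => simp only [pvMinD]; omega

theorem pvRelax_get (b v d f : Int) (dist : Std.HashMap Int Int) (w : Int) :
    (pvRelax b v d dist f)[w]? =
      if w = v + f ∧ w ≤ b then some (pvMinD (dist[w]?) (d + 1))
      else dist[w]? := by
  unfold pvRelax
  by_cases h1 : v + f ≤ b
  · simp only [if_pos h1]
    cases hg : dist[(v + f)]? with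
    | none =>
      rw [Std.HashMap.getElem?_insert]
      by_cases hw : w = v + f
      · subst hw
        simp [hg, pvMinD, h1]
      · have hne : ¬ v + f = w := fun h => hw h.symm
        simp [hw, hne]
    | some dw =>
      dsimp only
      by_cases hlt : d + 1 < dw
      · rw [if_pos hlt, Std.HashMap.getElem?_insert]
        by_cases hw : w = v + f
        · subst hw
          simp [hg, pvMinD, h1]
          omega
        · have hne : ¬ v + f = w := fun h => hw h.symm
          simp [hw, hne]
      · rw [if_neg hlt]
        by_cases hw : w = v + f
        · subst hw
          simp [hg, pvMinD, h1]
          omega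
        · simp [hw]
  · rw [if_neg h1]
    rw [if_neg (by rintro ⟨rfl, hc⟩; exact h1 hc)]

theorem pvRelax_fold (b v d : Int) (fs : List Int) (dist : Std.HashMap Int Int) (w : Int) :
    (fs.foldl (pvRelax b v d) dist)[w]? =
      if w ≤ b ∧ ∃ f ∈ fs, w = v + f then some (pvMinD (dist[w]?) (d + 1))
      else dist[w]? := by
  induction fs generalizing dist with
  | nil => simp
  | cons f t ih =>
    rw [List.foldl_cons, ih, pvRelax_get]
    by_cases h1 : w = v + f ∧ w ≤ b
    · by_cases h2 : w ≤ b ∧ ∃ f' ∈ t, w = v + f'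
      · rw [if_pos h2, if_pos h1, pvMinD_idem, if_pos ⟨h1.2, f, by simp, h1.1⟩]
      · rw [if_neg h2, if_pos h1, if_pos ⟨h1.2, f, by simp, h1.1⟩]
    · by_cases h2 : w ≤ b ∧ ∃ f' ∈ t, w = v + f'
      · rw [if_pos h2, if_neg h1,
          if_pos ⟨h2.1, by obtain ⟨f', hf', he⟩ := h2.2; exact ⟨f', by simp [hf'], he⟩⟩]
      · rw [if_neg h2, if_neg h1, if_neg (by
          rintro ⟨hwb, f', hf', he⟩
          rcases List.mem_cons.1 hf' with rfl | hmem
          · exact h1 ⟨he, hwb⟩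
          · exact h2 ⟨hwb, f', hmem, he⟩)]

def pvInv (b : Int) (divs : Array (List Int)) (a v : Int) (dist : Std.HashMap Int Int) : Prop :=
  ∀ w : Int,
    (dist[w]? = none → ∀ n : Nat, ¬ pvRch b divs a v n w) ∧
    (∀ dval : Int, dist[w]? = some dval → ∃ nd : Nat, dval = (nd : Int) ∧
      pvRch b divs a v nd w ∧ ∀ m : Nat, m < nd → ¬ pvRch b divs a v m w)

theorem pv_inv_init (b : Int) (divs : Array (List Int)) (a : Int) (HD : pvHD divs) :
    pvInv b divs a a ((∅ : Std.HashMap Int Int).insert a 0) := by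
  intro w
  rw [Std.HashMap.getElem?_insert]
  by_cases hw : w = a
  · rw [if_pos (show (a == w) = true by simp [hw])]
    refine ⟨by simp, ?_⟩
    intro dval hval
    rw [Option.some.injEq] at hval
    exact ⟨0, by omega, by rw [hw]; exact pvRch.zero a, fun m hm => absurd hm (by omega)⟩
  · rw [if_neg (show ¬ (a == w) = true by simp; exact fun h => hw h.symm), Std.HashMap.getElem?_empty]
    refine ⟨?_, by simp⟩
    intro _ n h
    cases h with
    | zero => exact hw rfl
    | succ hsub hu hf hle =>
      have h1 := pvRch_ge HD hsub
      omega

theorem pv_inv_step (b : Int) (a v : Int) (HD : pvHD (pvSieve b))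
    (dist : Std.HashMap Int Int) (hinv : pvInv b (pvSieve b) a v dist) :
    pvInv b (pvSieve b) a (v + 1)
      (match dist[v]? with
       | none => dist
       | some d => (pvNbrs (pvSieve b) v).foldl (pvRelax b v d) dist) := by
  cases hv : dist[v]? with
  | none =>
    have hnov : ∀ n, ¬ pvRch b (pvSieve b) a v n v := (hinv v).1 hv
    have heq : ∀ (n : Nat) (w : Int),
        pvRch b (pvSieve b) a (v + 1) n w ↔ pvRch b (pvSieve b) a v n w := by
      intro n w
      rw [pvRch_split HD]
      constructor
      · rintro (h | ⟨m, f, rfl, hrv, _⟩)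
        · exact h
        · exact absurd hrv (hnov m)
      · exact Or.inl
    intro w
    refine ⟨?_, ?_⟩
    · intro hnone n h
      exact (hinv w).1 hnone n ((heq n w).1 h)
    · intro dval hval
      obtain ⟨nd, h1, h2, h3⟩ := (hinv w).2 dval hval
      exact ⟨nd, h1, (heq nd w).2 h2, fun m hm hr => h3 m hm ((heq m w).1 hr)⟩
  | some d =>
    obtain ⟨nd, rfl, hrv, hminv⟩ := (hinv v).2 d hv
    intro w
    have hget := pvRelax_fold b v ((nd : Nat) : Int) (pvNbrs (pvSieve b) v) dist w
    by_cases hcond : w ≤ b ∧ ∃ f ∈ pvNbrs (pvSieve b) v, w = v + f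
    · rw [if_pos hcond] at hget
      obtain ⟨f0, hf0, hwf0⟩ := hcond.2
      have hreach_new : pvRch b (pvSieve b) a (v + 1) (nd + 1) w :=
        (pvRch_split HD).2 (Or.inr ⟨nd, f0, rfl, hrv, hf0, hwf0, hcond.1⟩)
      refine ⟨?_, ?_⟩
      · intro hnone
        rw [hnone] at hget
        cases hget
      · intro dval hval
        rw [hval, Option.some.injEq] at hget
        cases hold : dist[w]? with
        | none =>
          have hnone := (hinv w).1 hold
          rw [hold] at hget
          simp only [pvMinD] at hget
          refine ⟨nd + 1, by push_cast; omega, hreach_new, ?_⟩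
          intro m hm hr
          rcases (pvRch_split HD).1 hr with h | ⟨m', f', rfl, hrv', _, _, _⟩
          · exact hnone m h
          · exact hminv m' (by omega) hrv'
        | some dold =>
          obtain ⟨ndo, rfl, hro, hmino⟩ := (hinv w).2 dold hold
          rw [hold] at hget
          simp only [pvMinD] at hget
          refine ⟨min ndo (nd + 1), by rw [hget]; push_cast; omega, ?_, ?_⟩
          · rcases Nat.le_total ndo (nd + 1) with hle | hle
            · rw [Nat.min_eq_left hle]
              exact pvRch_mono (by omega) hro
            · rw [Nat.min_eq_right hle]
              exact hreach_new
          · intro m hm hr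
            rcases (pvRch_split HD).1 hr with h | ⟨m', f', rfl, hrv', _, _, _⟩
            · exact hmino m (by omega) h
            · have : nd ≤ m' := by
                by_contra hlt
                exact hminv m' (by omega) hrv'
              omega
    · rw [if_neg hcond] at hget
      have heqw : ∀ n : Nat,
          pvRch b (pvSieve b) a (v + 1) n w ↔ pvRch b (pvSieve b) a v n w := by
        intro n
        rw [pvRch_split HD]
        constructor
        · rintro (h | ⟨m, f, rfl, hrv', hf', hwf', hwb⟩)
          · exact h
          · exact absurd ⟨hwb, f, hf', hwf'⟩ hcond
        · exact Or.inl
      rw [hget]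
      refine ⟨?_, ?_⟩
      · intro hnone n h
        exact (hinv w).1 hnone n ((heqw n).1 h)
      · intro dval hval
        obtain ⟨nd', h1, h2, h3⟩ := (hinv w).2 dval hval
        exact ⟨nd', h1, (heqw nd').2 h2, fun m hm hr => h3 m hm ((heqw m).1 hr)⟩

theorem pv_sweep_inv (a b : Int) (HD : pvHD (pvSieve b)) :
    ∀ v : Int, a ≤ v → pvInv b (pvSieve b) a v (pvSweepTo a b v) := by
  intro v hv
  induction v, hv using Int.le_induction with
  | base =>
    unfold pvSweepTo
    rw [PySem.List.pyRange_one_eq_nil (by omega)]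
    exact pv_inv_init b (pvSieve b) a HD
  | succ v hav ih =>
    have hstep := pv_inv_step b a v HD (pvSweepTo a b v) ih
    unfold pvSweepTo
    rw [PySem.List.pyRange_one_succ_right hav, List.foldl_append]
    exact hstep

theorem pv_mem_insert (s : Std.HashSet Int) (x w : Int) :
    w ∈ s.insert x ↔ w ∈ s ∨ w = x := by
  rw [Std.HashSet.mem_insert, beq_iff_eq]
  exact or_comm.trans (or_congr_right eq_comm)

/- ===== A side: the BFS ===== -/

-- one-step extensions of full reach paths (what the seen set accumulates:
-- also the values that overshoot past b)
def pvRp (b : Int) (divs : Array (List Int)) (a : Int) (n : Nat) (w : Int) : Prop :=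
  (n = 0 ∧ w = a) ∨
    ∃ m u f, n = m + 1 ∧ pvRch b divs a (b + 1) m u ∧ f ∈ pvNbrs divs u ∧ w = u + f

theorem pvRp_of_rch {b : Int} {divs : Array (List Int)} {a : Int} {n : Nat} {w : Int}
    (h : pvRch b divs a (b + 1) n w) : pvRp b divs a n w := by
  cases h with
  | zero => exact Or.inl ⟨rfl, rfl⟩
  | succ hsub hu hf hle => exact Or.inr ⟨_, _, _, rfl, hsub, hf, rfl⟩

theorem pvRch_of_rp {b : Int} {divs : Array (List Int)} {a : Int} {n : Nat} {w : Int}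
    (ha : a ≤ b) (h : pvRp b divs a n w) (hw : w ≤ b) :
    pvRch b divs a (b + 1) n w := by
  rcases h with ⟨rfl, rfl⟩ | ⟨m, u, f, rfl, hr, hf, rfl⟩
  · exact .zero _
  · have hub : u ≤ b := by
      cases m with
      | zero => cases hr; omega
      | succ m' => exact pvRch_le_b hr (by omega)
    exact .succ hr (by omega) hf hw

theorem pvRp_ge {b : Int} {divs : Array (List Int)} {a : Int} {n : Nat} {w : Int}
    (HD : pvHD divs) (h : pvRp b divs a n w) : a + 2 * (n : Int) ≤ w := by
  rcases h with ⟨rfl, rfl⟩ | ⟨m, u, f, rfl, hr, hf, rfl⟩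
  · simp
  · have := pvRch_ge HD hr
    have := HD _ _ hf
    push_cast
    push_cast at *
    omega

def pvInvA (b : Int) (divs : Array (List Int)) (a : Int) (k : Nat) (par : List Int)
    (seen : Std.HashSet Int) : Prop :=
  (∀ w : Int, w ∈ seen ↔ ∃ n ≤ k, pvRp b divs a n w) ∧
  (∀ w : Int, w ∈ par ↔ pvRp b divs a k w ∧ (∀ n < k, ¬ pvRp b divs a n w) ∧ (w < b ∨ k = 0)) ∧
  (∀ n : Nat, 1 ≤ n → n ≤ k → ¬ pvRch b divs a (b + 1) n b)

theorem pvRp_zero {b : Int} {divs : Array (List Int)} {a w : Int} :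
    pvRp b divs a 0 w ↔ w = a := by
  unfold pvRp
  constructor
  · rintro (⟨_, rfl⟩ | ⟨m, u, f, hm, _⟩)
    · rfl
    · omega
  · rintro rfl; exact Or.inl ⟨rfl, rfl⟩

theorem pv_invA_init (b : Int) (divs : Array (List Int)) (a : Int) :
    pvInvA b divs a 0 [a] ((∅ : Std.HashSet Int).insert a) := by
  refine ⟨?_, ?_, ?_⟩
  · intro w
    rw [pv_mem_insert]
    simp only [Std.HashSet.not_mem_empty, false_or]
    constructor
    · intro hw
      exact ⟨0, le_refl 0, pvRp_zero.2 (by simpa using hw)⟩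
    · rintro ⟨n, hn, h⟩
      have hn0 : n = 0 := by omega
      subst hn0
      simp [pvRp_zero.1 h]
  · intro w
    simp only [List.mem_singleton]
    constructor
    · rintro rfl
      exact ⟨pvRp_zero.2 rfl, fun n hn => absurd hn (by omega), Or.inr (by simp)⟩
    · rintro ⟨h, _, _⟩
      exact pvRp_zero.1 h
  · intro n h1 h2 _
    omega

theorem pv_step_frozen (b depth p : Int) (fs : List Int) (d : Int) :
    fs.foldl (pvStep b depth p) (.error d) = .error d := by
  induction fs with
  | nil => rfl
  | cons f t ih => simpa [pvStep] using ih

theorem pv_round_frozen (b depth : Int) (divs : Array (List Int)) (par : List Int) (d : Int) :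
    par.foldl (fun acc p => (pvNbrs divs p).foldl (pvStep b depth p) acc) (.error d) = .error d := by
  induction par with
  | nil => rfl
  | cons p t ih => simpa [pv_step_frozen] using ih

theorem pv_inner_ok (b depth p : Int) (fs : List Int) (H : ∀ f ∈ fs, f + p ≠ b) :
    ∀ (s : Std.HashSet Int) (c : List Int), ∃ s' c',
      fs.foldl (pvStep b depth p) (.ok (s, c)) = .ok (s', c') ∧
      (∀ w : Int, w ∈ s' ↔ w ∈ s ∨ ∃ f ∈ fs, w = f + p) ∧
      (∀ w : Int, w ∈ c' ↔ w ∈ c ∨ (w < b ∧ w ∉ s ∧ ∃ f ∈ fs, w = f + p)) := by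
  induction fs with
  | nil => intro s c; exact ⟨s, c, rfl, by simp, by simp⟩
  | cons f t ih =>
    intro s c
    have hne : f + p ≠ b := H f (by simp)
    have Ht : ∀ f' ∈ t, f' + p ≠ b := fun f' hf' => H f' (by simp [hf'])
    rw [List.foldl_cons]
    by_cases hmem : f + p ∈ s
    · have hstep : pvStep b depth p (.ok (s, c)) f = .ok (s, c) := by
        simp [pvStep, hmem]
      rw [hstep]
      obtain ⟨s', c', heq, hs, hc⟩ := ih Ht s c
      refine ⟨s', c', heq, fun w => ?_, fun w => ?_⟩
      · rw [hs w]
        simp only [List.exists_mem_cons_iff]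
        constructor
        · rintro (h | h)
          · exact Or.inl h
          · exact Or.inr (Or.inr h)
        · rintro (h | rfl | h)
          · exact Or.inl h
          · exact Or.inl hmem
          · exact Or.inr h
      · rw [hc w]
        simp only [List.exists_mem_cons_iff]
        constructor
        · rintro (h | ⟨h1, h2, h3⟩)
          · exact Or.inl h
          · exact Or.inr ⟨h1, h2, Or.inr h3⟩
        · rintro (h | ⟨h1, h2, rfl | h3⟩)
          · exact Or.inl h
          · exact absurd hmem h2
          · exact Or.inr ⟨h1, h2, h3⟩
    · have hlt_or : f + p < b ∨ ¬ f + p < b := em _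
      have hstep : pvStep b depth p (.ok (s, c)) f =
          if f + p < b then .ok (s.insert (f + p), c ++ [f + p])
          else .ok (s.insert (f + p), c) := by
        simp [pvStep, hmem, hne]
      rcases hlt_or with hlt | hlt
      · rw [hstep, if_pos hlt]
        obtain ⟨s', c', heq, hs, hc⟩ := ih Ht (s.insert (f + p)) (c ++ [f + p])
        refine ⟨s', c', heq, fun w => ?_, fun w => ?_⟩
        · rw [hs w, pv_mem_insert]
          simp only [List.exists_mem_cons_iff]
          tauto
        · rw [hc w, pv_mem_insert]
          simp only [List.exists_mem_cons_iff, List.mem_append, List.mem_singleton]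
          constructor
          · rintro ((h | rfl) | ⟨h1, h2, h3⟩)
            · exact Or.inl h
            · exact Or.inr ⟨hlt, hmem, Or.inl rfl⟩
            · exact Or.inr ⟨h1, fun hw => h2 (Or.inl hw), Or.inr h3⟩
          · rintro (h | ⟨h1, h2, rfl | h3⟩)
            · exact Or.inl (Or.inl h)
            · exact Or.inl (Or.inr rfl)
            · by_cases hwf : w = f + p
              · exact Or.inl (Or.inr hwf)
              · exact Or.inr ⟨h1, by rintro (hw | hw); exact h2 hw; exact hwf hw, h3⟩
      · rw [hstep, if_neg hlt]
        obtain ⟨s', c', heq, hs, hc⟩ := ih Ht (s.insert (f + p)) c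
        refine ⟨s', c', heq, fun w => ?_, fun w => ?_⟩
        · rw [hs w, pv_mem_insert]
          simp only [List.exists_mem_cons_iff]
          tauto
        · rw [hc w, pv_mem_insert]
          simp only [List.exists_mem_cons_iff]
          constructor
          · rintro (h | ⟨h1, h2, h3⟩)
            · exact Or.inl h
            · exact Or.inr ⟨h1, fun hw => h2 (Or.inl hw), Or.inr h3⟩
          · rintro (h | ⟨h1, h2, rfl | h3⟩)
            · exact Or.inl h
            · exact absurd h1 hlt
            · by_cases hwf : w = f + p
              · subst hwf; exact absurd h1 hlt
              · exact Or.inr ⟨h1, by rintro (hw | hw); exact h2 hw; exact hwf hw, h3⟩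

theorem pv_outer_ok (b depth : Int) (divs : Array (List Int)) (par : List Int)
    (H : ∀ p ∈ par, ∀ f ∈ pvNbrs divs p, f + p ≠ b) :
    ∀ (s : Std.HashSet Int) (c : List Int), ∃ s' c',
      par.foldl (fun acc p => (pvNbrs divs p).foldl (pvStep b depth p) acc) (.ok (s, c)) = .ok (s', c') ∧
      (∀ w : Int, w ∈ s' ↔ w ∈ s ∨ ∃ p ∈ par, ∃ f ∈ pvNbrs divs p, w = f + p) ∧
      (∀ w : Int, w ∈ c' ↔ w ∈ c ∨ (w < b ∧ w ∉ s ∧ ∃ p ∈ par, ∃ f ∈ pvNbrs divs p, w = f + p)) := by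
  induction par with
  | nil => intro s c; exact ⟨s, c, rfl, by simp, by simp⟩
  | cons p t ih =>
    intro s c
    have Hp : ∀ f ∈ pvNbrs divs p, f + p ≠ b := H p (by simp)
    have Ht : ∀ p' ∈ t, ∀ f ∈ pvNbrs divs p', f + p' ≠ b := fun p' hp' => H p' (by simp [hp'])
    rw [List.foldl_cons]
    obtain ⟨s1, c1, heq1, hs1, hc1⟩ := pv_inner_ok b depth p (pvNbrs divs p) Hp s c
    rw [heq1]
    obtain ⟨s', c', heq, hs, hc⟩ := ih Ht s1 c1
    refine ⟨s', c', heq, fun w => ?_, fun w => ?_⟩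
    · rw [hs w, hs1 w]
      simp only [List.exists_mem_cons_iff]
      rw [or_assoc]
    · rw [hc w, hc1 w, hs1 w]
      simp only [List.exists_mem_cons_iff]
      constructor
      · rintro ((h | ⟨h1, h2, h3⟩) | ⟨h1, h2, h3⟩)
        · exact Or.inl h
        · exact Or.inr ⟨h1, h2, Or.inl h3⟩
        · rw [not_or] at h2
          exact Or.inr ⟨h1, h2.1, Or.inr h3⟩
      · rintro (h | ⟨h1, h2, h3 | h3⟩)
        · exact Or.inl (Or.inl h)
        · exact Or.inl (Or.inr ⟨h1, h2, h3⟩)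
        · by_cases hwp : ∃ f ∈ pvNbrs divs p, w = f + p
          · exact Or.inl (Or.inr ⟨h1, h2, hwp⟩)
          · exact Or.inr ⟨h1, by rintro (hw | hw); exact h2 hw; exact hwp hw, h3⟩

theorem pv_inner_err (b depth p : Int) (fs : List Int) :
    ∀ (s : Std.HashSet Int) (c : List Int), b ∉ s → (∃ f ∈ fs, f + p = b) →
      fs.foldl (pvStep b depth p) (.ok (s, c)) = .error depth := by
  induction fs with
  | nil => rintro s c _ ⟨f, hf, _⟩; simp at hf
  | cons f t ih =>
    rintro s c hbs ⟨f0, hf0, hf0b⟩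
    rw [List.foldl_cons]
    by_cases hfb : f + p = b
    · have hstep : pvStep b depth p (.ok (s, c)) f = .error depth := by
        simp [pvStep, hfb, hbs]
      rw [hstep, pv_step_frozen]
    · rcases List.mem_cons.1 hf0 with rfl | hf0t
      · exact absurd hf0b hfb
      · by_cases hmem : f + p ∈ s
        · have hstep : pvStep b depth p (.ok (s, c)) f = .ok (s, c) := by
            simp [pvStep, hmem]
          rw [hstep]
          exact ih s c hbs ⟨f0, hf0t, hf0b⟩
        · have hbs' : b ∉ s.insert (f + p) := by
            rw [pv_mem_insert]
            rintro (h | h)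
            · exact hbs h
            · exact hfb h.symm
          by_cases hlt : f + p < b
          · have hstep : pvStep b depth p (.ok (s, c)) f =
                .ok (s.insert (f + p), c ++ [f + p]) := by
              simp [pvStep, hmem, hfb, hlt]
            rw [hstep]
            exact ih _ _ hbs' ⟨f0, hf0t, hf0b⟩
          · have hstep : pvStep b depth p (.ok (s, c)) f =
                .ok (s.insert (f + p), c) := by
              simp [pvStep, hmem, hfb, hlt]
            rw [hstep]
            exact ih _ _ hbs' ⟨f0, hf0t, hf0b⟩

theorem pv_outer_err (b depth : Int) (divs : Array (List Int)) (par : List Int) :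
    ∀ (s : Std.HashSet Int) (c : List Int), b ∉ s → (∃ p ∈ par, ∃ f ∈ pvNbrs divs p, f + p = b) →
      par.foldl (fun acc p => (pvNbrs divs p).foldl (pvStep b depth p) acc) (.ok (s, c)) = .error depth := by
  induction par with
  | nil => rintro s c _ ⟨p, hp, _⟩; simp at hp
  | cons p t ih =>
    rintro s c hbs ⟨p0, hp0, hx⟩
    rw [List.foldl_cons]
    by_cases hp : ∃ f ∈ pvNbrs divs p, f + p = b
    · rw [pv_inner_err b depth p (pvNbrs divs p) s c hbs hp, pv_round_frozen]
    · have hp' : ∀ f ∈ pvNbrs divs p, f + p ≠ b := fun f hf hfb => hp ⟨f, hf, hfb⟩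
      obtain ⟨s1, c1, heq1, hs1, _⟩ := pv_inner_ok b depth p (pvNbrs divs p) hp' s c
      rw [heq1]
      have hbs1 : b ∉ s1 := by
        rw [hs1 b]
        rintro (h | ⟨f, hf, hfb⟩)
        · exact hbs h
        · exact hp' f hf hfb.symm
      rcases List.mem_cons.1 hp0 with rfl | hp0t
      · obtain ⟨f, hf, hfb⟩ := hx
        exact absurd hfb (hp' f hf)
      · exact ih s1 c1 hbs1 ⟨p0, hp0t, hx⟩

-- below every minimal positive reach distance there is a node of every smaller level
theorem pv_exists_level {b : Int} {divs : Array (List Int)} {a : Int}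
    (HD : pvHD divs) (ha : a ≤ b) :
    ∀ (n : Nat) (w : Int), pvRch b divs a (b + 1) n w → (∀ m < n, ¬ pvRp b divs a m w) →
      ∀ k < n, ∃ x, pvRp b divs a k x ∧ (∀ m < k, ¬ pvRp b divs a m x) ∧ (x < b ∨ k = 0) := by
  intro n
  induction n with
  | zero => intro w _ _ k hk; omega
  | succ n ih =>
    intro w hw hmin k hk
    obtain ⟨u, f, hu, hub', hf, hwuf, hwb, hub⟩ := pvRch_succ_inv HD hw
    have humin : ∀ m < n, ¬ pvRp b divs a m u := by
      intro m hm hrp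
      have hru : pvRch b divs a (b + 1) m u := pvRch_of_rp ha hrp (le_of_lt hub)
      exact hmin (m + 1) (by omega) (Or.inr ⟨m, u, f, rfl, hru, hf, hwuf⟩)
    rcases Nat.lt_or_ge k n with hkn | hkn
    · exact ih u hu humin k hkn
    · have hk_eq : k = n := by omega
      subst hk_eq
      exact ⟨u, pvRp_of_rch hu, humin, Or.inl hub⟩

theorem pv_invA_step {b : Int} {divs : Array (List Int)} {a : Int}
    (ha : a ≤ b) {k : Nat} {par : List Int} {seen s' : Std.HashSet Int} {c' : List Int}
    (hinv : pvInvA b divs a k par seen)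
    (hnb : ¬ pvRch b divs a (b + 1) (k + 1) b)
    (hs' : ∀ w : Int, w ∈ s' ↔ w ∈ seen ∨ ∃ p ∈ par, ∃ f ∈ pvNbrs divs p, w = f + p)
    (hc' : ∀ w : Int, w ∈ c' ↔ w < b ∧ w ∉ seen ∧ ∃ p ∈ par, ∃ f ∈ pvNbrs divs p, w = f + p) :
    pvInvA b divs a (k + 1) c' s' := by
  obtain ⟨hseen, hpar, hnob⟩ := hinv
  have hpar_r : ∀ p ∈ par, pvRch b divs a (b + 1) k p ∧ p ≤ b := by
    intro p hp
    obtain ⟨hrp, hmin, hside⟩ := (hpar p).1 hp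
    rcases hside with hlt | hk0
    · exact ⟨pvRch_of_rp ha hrp (le_of_lt hlt), le_of_lt hlt⟩
    · subst hk0
      have hpa : p = a := pvRp_zero.1 hrp
      subst hpa
      exact ⟨pvRch.zero _, ha⟩
  have himg_rp : ∀ p ∈ par, ∀ f ∈ pvNbrs divs p, pvRp b divs a (k + 1) (f + p) := by
    intro p hp f hf
    exact Or.inr ⟨k, p, f, rfl, (hpar_r p hp).1, hf, by omega⟩
  have hRp1 : ∀ w : Int, pvRp b divs a (k + 1) w →
      (∃ n ≤ k, pvRp b divs a n w) ∨ ∃ p ∈ par, ∃ f ∈ pvNbrs divs p, w = f + p := by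
    rintro w (⟨habs, _⟩ | ⟨m, u, f, hm, hru, hf, rfl⟩)
    · omega
    · have hmk : m = k := by omega
      rw [hmk] at hru
      obtain ⟨j, hjk, hPj, hjmin⟩ := pv_least (fun j => pvRp b divs a j u) k (pvRp_of_rch hru)
      rcases Nat.lt_or_ge j k with hjlt | hjge
      · have hkpos : 1 ≤ k := by omega
        have hub : u ≤ b := pvRch_le_b hru (by omega)
        have hrju : pvRch b divs a (b + 1) j u := pvRch_of_rp ha hPj hub
        exact Or.inl ⟨j + 1, by omega, Or.inr ⟨j, u, f, rfl, hrju, hf, rfl⟩⟩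
      · have hjk' : j = k := by omega
        rw [hjk'] at hPj hjmin
        have hupar : u ∈ par := by
          refine (hpar u).2 ⟨hPj, hjmin, ?_⟩
          rcases Nat.eq_zero_or_pos k with hk0 | hkpos
          · exact Or.inr hk0
          · have hub : u ≤ b := pvRch_le_b hru (by omega)
            rcases lt_or_eq_of_le hub with h | h
            · exact Or.inl h
            · exact absurd (h ▸ hru) (hnob k hkpos (le_refl k))
        exact Or.inr ⟨u, hupar, f, hf, by omega⟩
  refine ⟨?_, ?_, ?_⟩
  · intro w
    rw [hs' w, hseen w]
    constructor
    · rintro (⟨n, hn, hrp⟩ | ⟨p, hp, f, hf, rfl⟩)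
      · exact ⟨n, by omega, hrp⟩
      · exact ⟨k + 1, le_refl _, himg_rp p hp f hf⟩
    · rintro ⟨n, hn, hrp⟩
      rcases Nat.lt_or_ge n (k + 1) with h | h
      · exact Or.inl ⟨n, by omega, hrp⟩
      · have hn' : n = k + 1 := by omega
        subst hn'
        exact hRp1 w hrp
  · intro w
    rw [hc' w]
    constructor
    · rintro ⟨hwb, hns, p, hp, f, hf, rfl⟩
      refine ⟨himg_rp p hp f hf, ?_, Or.inl hwb⟩
      intro n hn hrp
      exact hns ((hseen _).2 ⟨n, by omega, hrp⟩)
    · rintro ⟨hrp, hminw, hside⟩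
      have hwb : w < b := by
        rcases hside with h | h
        · exact h
        · omega
      have hns : w ∉ seen := by
        intro hwseen
        obtain ⟨n, hn, hrpn⟩ := (hseen w).1 hwseen
        exact hminw n (by omega) hrpn
      rcases hRp1 w hrp with ⟨n, hn, hrpn⟩ | himg
      · exact absurd hrpn (hminw n (by omega))
      · exact ⟨hwb, hns, himg⟩
  · intro n h1 h2
    rcases Nat.lt_or_ge n (k + 1) with h | h
    · exact hnob n h1 (by omega)
    · have hn' : n = k + 1 := by omega
      subst hn'
      exact fun hc => hnb hc

theorem pv_par_reach {b : Int} {divs : Array (List Int)} {a : Int} {k : Nat}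
    {par : List Int} {seen : Std.HashSet Int} (ha : a ≤ b)
    (hinv : pvInvA b divs a k par seen) :
    ∀ p ∈ par, pvRch b divs a (b + 1) k p ∧ p ≤ b := by
  intro p hp
  obtain ⟨hrp, hmin, hside⟩ := (hinv.2.1 p).1 hp
  rcases hside with hlt | hk0
  · exact ⟨pvRch_of_rp ha hrp (le_of_lt hlt), le_of_lt hlt⟩
  · subst hk0
    have hpa : p = a := pvRp_zero.1 hrp
    subst hpa
    exact ⟨pvRch.zero _, ha⟩

theorem pv_minrp_b {b : Int} {divs : Array (List Int)} {a : Int} {n : Nat}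
    (HD : pvHD divs) (ha : a ≤ b) (hr : pvRch b divs a (b + 1) n b) (hn : 0 < n)
    (hmin : ∀ m : Nat, 0 < m → m < n → ¬ pvRch b divs a (b + 1) m b) :
    ∀ m < n, ¬ pvRp b divs a m b := by
  intro m hm hrp
  rcases Nat.eq_zero_or_pos m with rfl | hmpos
  · have hba : b = a := pvRp_zero.1 hrp
    have := pvRch_ge HD hr
    omega
  · exact hmin m hmpos hm (pvRch_of_rp ha hrp (le_refl b))

theorem pv_loop_found {b : Int} {a : Int} (HD : pvHD (pvSieve b)) (ha : a ≤ b) :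
    ∀ (fuel : Nat) (k : Nat) (par : List Int) (seen : Std.HashSet Int),
      pvInvA b (pvSieve b) a k par seen → (b - a).toNat + 2 ≤ fuel + k →
      ∀ n : Nat, 0 < n → pvRch b (pvSieve b) a (b + 1) n b →
        (∀ m : Nat, 0 < m → m < n → ¬ pvRch b (pvSieve b) a (b + 1) m b) →
        pvLoop b (pvSieve b) fuel (k : Int) par seen = (n : Int) := by
  intro fuel
  induction fuel with
  | zero =>
    intro k par seen hinv hfuel n hn hr hmin
    exfalso
    have hkn : k < n := by
      by_contra hc
      exact hinv.2.2 n hn (by omega) hr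
    obtain ⟨x, hxrp, _, hxside⟩ :=
      pv_exists_level HD ha n b hr (pv_minrp_b HD ha hr hn hmin) k hkn
    have hge := pvRp_ge HD hxrp
    have hxle : x ≤ b := by
      rcases hxside with h | h
      · omega
      · subst h
        rw [pvRp_zero.1 hxrp]
        exact ha
    omega
  | succ fuel ih =>
    intro k par seen hinv hfuel n hn hr hmin
    have hkn : k < n := by
      by_contra hc
      exact hinv.2.2 n hn (by omega) hr
    have hminrp := pv_minrp_b HD ha hr hn hmin
    obtain ⟨x, hxrp, hxmin, hxside⟩ := pv_exists_level HD ha n b hr hminrp k hkn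
    have hxpar : x ∈ par := (hinv.2.1 x).2 ⟨hxrp, hxmin, hxside⟩
    have hpar_ne : par ≠ [] := fun h => by simp [h] at hxpar
    simp only [pvLoop]
    rw [if_neg hpar_ne]
    have hbseen : b ∉ seen := by
      intro hbs
      obtain ⟨m, hm, hrpm⟩ := (hinv.1 b).1 hbs
      exact hminrp m (by omega) hrpm
    by_cases hstep : n = k + 1
    · subst hstep
      obtain ⟨u, f, hu, _, hf, hbuf, _, hub⟩ := pvRch_succ_inv HD hr
      have hupar : u ∈ par := by
        refine (hinv.2.1 u).2 ⟨pvRp_of_rch hu, ?_, Or.inl hub⟩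
        intro m hm hrpm
        have hru : pvRch b (pvSieve b) a (b + 1) m u := pvRch_of_rp ha hrpm (le_of_lt hub)
        have h2 : pvRch b (pvSieve b) a (b + 1) (m + 1) (u + f) :=
          pvRch.succ hru (by omega) hf (by omega)
        rw [← hbuf] at h2
        exact hmin (m + 1) (by omega) (by omega) h2
      unfold pvRound
      rw [pv_outer_err b ((k : Int) + 1) (pvSieve b) par seen [] hbseen
        ⟨u, hupar, f, hf, by omega⟩]
      push_cast
      rfl
    · have hnb : ¬ pvRch b (pvSieve b) a (b + 1) (k + 1) b :=
        hmin (k + 1) (by omega) (by omega)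
      have H : ∀ p ∈ par, ∀ f ∈ pvNbrs (pvSieve b) p, f + p ≠ b := by
        intro p hp f hf heq
        obtain ⟨hrp, hpb⟩ := pv_par_reach ha hinv p hp
        exact hnb (by
          have := pvRch.succ hrp (by omega) hf (by omega : p + f ≤ b)
          rwa [show p + f = b by omega] at this)
      obtain ⟨s', c', heq, hs', hc'⟩ :=
        pv_outer_ok b ((k : Int) + 1) (pvSieve b) par H seen []
      unfold pvRound
      rw [heq]
      have hinv' : pvInvA b (pvSieve b) a (k + 1) c' s' :=
        pv_invA_step ha hinv hnb (by intro w; rw [hs' w])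
          (by intro w; rw [hc' w]; simp)
      have hcast : (k : Int) + 1 = ((k + 1 : Nat) : Int) := by push_cast; ring
      rw [hcast]
      exact ih (k + 1) c' s' hinv' (by omega) n hn hr hmin

theorem pv_loop_notfound {b : Int} {a : Int} (ha : a ≤ b) :
    ∀ (fuel : Nat) (k : Nat) (par : List Int) (seen : Std.HashSet Int),
      pvInvA b (pvSieve b) a k par seen →
      (∀ n : Nat, 0 < n → ¬ pvRch b (pvSieve b) a (b + 1) n b) →
      pvLoop b (pvSieve b) fuel (k : Int) par seen = -1 := by
  intro fuel
  induction fuel with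
  | zero => intro k par seen _ _; rfl
  | succ fuel ih =>
    intro k par seen hinv hno
    simp only [pvLoop]
    by_cases hpar : par = []
    · rw [if_pos hpar]
    · rw [if_neg hpar]
      have hnb : ¬ pvRch b (pvSieve b) a (b + 1) (k + 1) b := hno (k + 1) (by omega)
      have H : ∀ p ∈ par, ∀ f ∈ pvNbrs (pvSieve b) p, f + p ≠ b := by
        intro p hp f hf heq
        obtain ⟨hrp, hpb⟩ := pv_par_reach ha hinv p hp
        exact hnb (by
          have := pvRch.succ hrp (by omega) hf (by omega : p + f ≤ b)
          rwa [show p + f = b by omega] at this)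
      obtain ⟨s', c', heq, hs', hc'⟩ :=
        pv_outer_ok b ((k : Int) + 1) (pvSieve b) par H seen []
      unfold pvRound
      rw [heq]
      have hinv' : pvInvA b (pvSieve b) a (k + 1) c' s' :=
        pv_invA_step ha hinv hnb (by intro w; rw [hs' w])
          (by intro w; rw [hc' w]; simp)
      have hcast : (k : Int) + 1 = ((k + 1 : Nat) : Int) := by push_cast; ring
      rw [hcast]
      exact ih (k + 1) c' s' hinv' hno

/- ===== assembly ===== -/

theorem pv_main (a b : Int) (hb : 0 ≤ b) (ha1 : -(b + 1) ≤ a) (ha2 : a ≤ b) :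
    solution a b = solution_alt a b := by
  have HD : pvHD (pvSieve b) := fun u f h => pvNbrs_pos b u f h
  have hsweep := pv_sweep_inv a b HD (b + 1) (by omega)
  have hinit := pv_invA_init b (pvSieve b) a
  have hsol : solution a b =
      pvLoop b (pvSieve b) ((b - a).toNat + 2) ((0 : Nat) : Int) [a] ((∅ : Std.HashSet Int).insert a) := rfl
  rw [pv_alt_eq]
  by_cases hex : ∃ n : Nat, 0 < n ∧ pvRch b (pvSieve b) a (b + 1) n b
  · obtain ⟨n1, hn1⟩ := hex
    obtain ⟨n0, _, ⟨hpos, hr⟩, hmin0⟩ :=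
      pv_least (fun n => 0 < n ∧ pvRch b (pvSieve b) a (b + 1) n b) n1 hn1
    have hmin : ∀ m : Nat, 0 < m → m < n0 → ¬ pvRch b (pvSieve b) a (b + 1) m b :=
      fun m h1 h2 hc => hmin0 m h2 ⟨h1, hc⟩
    have hA : solution a b = (n0 : Int) := by
      rw [hsol]
      exact pv_loop_found HD ha2 _ 0 [a] _ hinit (by omega) n0 hpos hr hmin
    cases hgb : (pvSweepTo a b (b + 1))[b]? with
    | none => exact absurd hr ((hsweep b).1 hgb n0)
    | some d =>
      obtain ⟨nd, rfl, hrd, hmind⟩ := (hsweep b).2 d hgb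
      have hnd : nd = n0 := by
        rcases lt_trichotomy nd n0 with h | h | h
        · exfalso
          rcases Nat.eq_zero_or_pos nd with rfl | hndpos
          · have hba : b = a := by cases hrd; rfl
            have := pvRch_ge HD hr
            omega
          · exact hmin nd hndpos h hrd
        · exact h
        · exact absurd hr (hmind n0 h)
      subst hnd
      rw [hA]
      simp
      omega
  · have hno : ∀ n : Nat, 0 < n → ¬ pvRch b (pvSieve b) a (b + 1) n b :=
      fun n hn hr => hex ⟨n, hn, hr⟩
    have hA : solution a b = -1 := by
      rw [hsol]
      exact pv_loop_notfound ha2 _ 0 [a] _ hinit hno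
    cases hgb : (pvSweepTo a b (b + 1))[b]? with
    | none => rw [hA]
    | some d =>
      obtain ⟨nd, rfl, hrd, _⟩ := (hsweep b).2 d hgb
      have hnd : nd = 0 := by
        by_contra h
        exact hno nd (Nat.pos_of_ne_zero h) hrd
      subst hnd
      rw [hA]
      simp

-- ===== VERDICT (by name: the statement is the Claim_ definition above) =====
theorem solution_spec : Claim_equal_solution := by
  intro a b _ hpre
  obtain ⟨hb, ha1, ha2⟩ := hpre
  exact pv_main a b hb ha1 ha2
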